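-- pv_equiv track=rewrite | github.com/minghaoguo81/Data-Structure-and-Algorithm-Class-Solutions | Data Structure/Week 1/network_simulation.py | processPacket
-- ===== SOURCE A (Python) =====
-- from collections import deque
--
-- def processPacket(packets, bufsize):
--     buffer = deque(maxlen=bufsize)
--
--     start_times = [None] * len(packets)
--     for i, (arrival, duration) in enumerate(packets):
--         while buffer and buffer[0] <= arrival:
--             buffer.popleft()
--
--         if len(buffer) >= bufsize:
--             start_times[i] = -1
--         else:
--             start_times[i] = max(arrival, buffer[-1] if buffer else 0)
--             buffer.append(start_times[i] + duration)
--     return start_times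
-- ===== SOURCE B (Python) =====
-- def processPacket(packets, bufsize):
--     # Keep every accepted finish time in one append-only list (nondecreasing
--     # for nonnegative durations); skip all expired entries at once with a
--     # hand-written binary search that moves a head pointer, instead of
--     # popping a deque one element at a time.
--     finishes = []
--     head = 0
--     out = []
--     for arrival, duration in packets:
--         lo, hi = head, len(finishes)
--         while lo < hi:
--             mid = (lo + hi) // 2
--             if finishes[mid] <= arrival:
--                 lo = mid + 1
--             else:
--                 hi = mid
--         head = lo
--         if len(finishes) - head >= bufsize:
--             out.append(-1)
--         else:
--             start = max(arrival, finishes[-1] if head < len(finishes) else 0)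
--             out.append(start)
--             finishes.append(start + duration)
--     return out
-- ===== Notes on version B (the rewrite author's own statement) =====
-- stated objective: alternative
-- what changed: Replaces the deque simulation's element-by-element popleft scan with an append-only list of all accepted finish times plus a head pointer that jumps over all expired entries at once via a hand-written binary search (correct because finish times are nondecreasing when durations are nonnegative).
-- outside the precondition, e.g. on processPacket([(1, 2)], -1): A raises ValueError, B returns [-1]; on processPacket([(0, 5), (0, -4), (3, 1)], 2): A returns [0, 5, -1], B returns [0, 5, 3]
import Mathlib
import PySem

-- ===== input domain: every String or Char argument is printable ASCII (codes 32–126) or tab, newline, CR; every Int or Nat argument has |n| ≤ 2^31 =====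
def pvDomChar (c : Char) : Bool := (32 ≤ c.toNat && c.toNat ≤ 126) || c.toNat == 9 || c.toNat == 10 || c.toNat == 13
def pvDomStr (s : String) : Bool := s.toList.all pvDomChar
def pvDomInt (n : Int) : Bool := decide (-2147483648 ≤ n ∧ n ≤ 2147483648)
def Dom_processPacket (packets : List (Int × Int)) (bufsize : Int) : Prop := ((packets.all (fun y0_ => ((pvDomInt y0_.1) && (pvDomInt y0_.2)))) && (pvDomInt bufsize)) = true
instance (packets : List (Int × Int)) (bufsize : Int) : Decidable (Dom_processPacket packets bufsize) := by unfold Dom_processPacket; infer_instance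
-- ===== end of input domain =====

-- B replaces A's deque with an append-only list of all accepted finish times plus a
-- head pointer moved by a binary search over the monotone finish times (alternative
-- algorithm, not claimed faster); equivalence proved on nonnegative bufsize/durations.

-- ===== PORT A =====
-- while buffer and buffer[0] <= arrival: buffer.popleft()
def pvDropExpired (buf : List Int) (arrival : Int) : List Int :=
  match buf with
  | [] => []
  | x :: xs => if x ≤ arrival then pvDropExpired xs arrival else x :: xs

def pvALoop (bufsize : Int) (packets : List (Int × Int)) (buf : List Int) : List Int :=
  match packets with
  | [] => []
  | (arrival, duration) :: rest =>
    let buf' := pvDropExpired buf arrival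
    if bufsize ≤ (buf'.length : Int) then
      (-1) :: pvALoop bufsize rest buf'
    else
      let st := max arrival (buf'.getLastD 0)
      st :: pvALoop bufsize rest (buf' ++ [st + duration])

def processPacket (packets : List (Int × Int)) (bufsize : Int) : List Int :=
  pvALoop bufsize packets []

-- ===== PORT B =====
-- the hand-written bisect_right loop: while lo < hi: mid = (lo+hi)//2; …
def pvBisect (fs : List Int) (x : Int) (lo hi : Nat) : Nat :=
  if _h : lo < hi then
    if fs.getD ((lo + hi) / 2) 0 ≤ x then pvBisect fs x ((lo + hi) / 2 + 1) hi
    else pvBisect fs x lo ((lo + hi) / 2)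
  else lo
termination_by hi - lo
decreasing_by all_goals omega

def pvBLoop (bufsize : Int) (packets : List (Int × Int)) (fs : List Int) (head : Nat) : List Int :=
  match packets with
  | [] => []
  | (arrival, duration) :: rest =>
    let head' := pvBisect fs arrival head fs.length
    if ((fs.length : Int) - (head' : Int)) ≥ bufsize then
      (-1) :: pvBLoop bufsize rest fs head'
    else
      let st := max arrival (if head' < fs.length then fs.getLastD 0 else 0)
      st :: pvBLoop bufsize rest (fs ++ [st + duration]) head'

def processPacket_alt (packets : List (Int × Int)) (bufsize : Int) : List Int :=
  pvBLoop bufsize packets [] 0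

-- ===== PRECONDITION & SPEC =====
-- Pre_ restricts to the simulation's natural domain: bufsize ≥ 0 (Python's
-- deque(maxlen=bufsize) raises ValueError on a negative maxlen) and nonnegative
-- processing durations, on which the accepted finish times are nondecreasing;
-- negative durations are excluded because B's binary search relies on that
-- monotonicity and may disagree with A's linear scan there.
def Pre_processPacket (packets : List (Int × Int)) (bufsize : Int) : Prop :=
  0 ≤ bufsize ∧ ∀ p ∈ packets, 0 ≤ p.2
instance (packets : List (Int × Int)) (bufsize : Int) : Decidable (Pre_processPacket packets bufsize) := by unfold Pre_processPacket; infer_instance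
def pvWitness_processPacket : (List (Int × Int)) × Int := ([(1, 2), (2, 3), (3, 1)], 2)

def Spec_processPacket (packets : List (Int × Int)) (bufsize : Int) (out : List Int) : Prop := out = processPacket_alt packets bufsize
instance (packets : List (Int × Int)) (bufsize : Int) (out : List Int) : Decidable (Spec_processPacket packets bufsize out) := by unfold Spec_processPacket; infer_instance

-- ===== CLAIM (what is proved, stated in full; the proofs are below) =====
def Claim_equal_processPacket : Prop := ∀ (packets : List (Int × Int)) (bufsize : Int), Dom_processPacket packets bufsize → Pre_processPacket packets bufsize → Spec_processPacket packets bufsize (processPacket packets bufsize)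

-- ===== LEMMAS AND PROOFS =====

-- the binary search returns the least index in [lo, hi] past all entries ≤ x
theorem pvBisect_spec (fs : List Int) (x : Int)
    (hmono : ∀ i j : Nat, i ≤ j → j < fs.length → fs.getD i 0 ≤ fs.getD j 0)
    (lo hi : Nat) (hlh : lo ≤ hi) (hhl : hi ≤ fs.length) :
    lo ≤ pvBisect fs x lo hi ∧ pvBisect fs x lo hi ≤ hi ∧
    (∀ i, lo ≤ i → i < pvBisect fs x lo hi → fs.getD i 0 ≤ x) ∧
    (∀ i, pvBisect fs x lo hi ≤ i → i < hi → x < fs.getD i 0) := by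
  by_cases h : lo < hi
  · rw [pvBisect]
    simp only [dif_pos h]
    by_cases hm : fs.getD ((lo + hi) / 2) 0 ≤ x
    · simp only [if_pos hm]
      obtain ⟨h1, h2, h3, h4⟩ := pvBisect_spec fs x hmono ((lo + hi) / 2 + 1) hi (by omega) hhl
      refine ⟨by omega, h2, ?_, h4⟩
      intro i hi1 hi2
      by_cases hc : (lo + hi) / 2 + 1 ≤ i
      · exact h3 i hc hi2
      · exact le_trans (hmono i ((lo + hi) / 2) (by omega) (by omega)) hm
    · simp only [if_neg hm]
      obtain ⟨h1, h2, h3, h4⟩ := pvBisect_spec fs x hmono lo ((lo + hi) / 2) (by omega) (by omega)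
      refine ⟨h1, by omega, h3, ?_⟩
      intro i hi1 hi2
      by_cases hc : i < (lo + hi) / 2
      · exact h4 i hi1 hc
      · exact lt_of_lt_of_le (lt_of_not_ge hm) (hmono ((lo + hi) / 2) i (by omega) (by omega))
  · rw [pvBisect]
    simp only [dif_neg h]
    exact ⟨le_refl _, by omega, by omega, by omega⟩
termination_by hi - lo
decreasing_by all_goals omega

-- A's popleft loop lands exactly where the binary search points
theorem dropExpired_eq (fs : List Int) (x : Int) :
    ∀ h r : Nat, h ≤ r → r ≤ fs.length →
    (∀ i, h ≤ i → i < r → fs.getD i 0 ≤ x) →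
    (r < fs.length → x < fs.getD r 0) →
    pvDropExpired (fs.drop h) x = fs.drop r := by
  intro h r hhr hrl hle hgt
  induction hn : r - h generalizing h with
  | zero =>
    have : h = r := by omega
    subst this
    by_cases hl : h < fs.length
    · have hdrop : fs.drop h = fs[h] :: fs.drop (h + 1) := List.drop_eq_getElem_cons hl
      rw [hdrop, pvDropExpired]
      have : fs.getD h 0 = fs[h] := List.getD_eq_getElem fs 0 hl
      have hx : ¬ fs[h] ≤ x := by have := hgt hl; omega
      simp [hx, ← hdrop]
    · have : h = fs.length := by omega
      simp [this, pvDropExpired]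
  | succ n ih =>
    have hl : h < fs.length := by omega
    have hdrop : fs.drop h = fs[h] :: fs.drop (h + 1) := List.drop_eq_getElem_cons hl
    rw [hdrop, pvDropExpired]
    have hgd : fs.getD h 0 = fs[h] := List.getD_eq_getElem fs 0 hl
    have hx : fs[h] ≤ x := by have := hle h (le_refl h) (by omega); omega
    simp only [hx, if_pos]
    exact ih (h + 1) (by omega) (fun i hi1 hi2 => hle i (by omega) hi2) (by omega)

theorem getLastD_drop (fs : List Int) (h : Nat) (hlt : h < fs.length) :
    (fs.drop h).getLastD 0 = fs.getLastD 0 := by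
  have h1 : (fs.drop h).getLast? = fs.getLast? := by
    rw [List.getLast?_eq_getElem?, List.getLast?_eq_getElem?]
    rw [List.getElem?_drop, List.length_drop]
    congr 1
    omega
  rw [List.getLastD_eq_getLast?, List.getLastD_eq_getLast?, h1]

-- in a sorted list every element is bounded by the last one
theorem mem_le_getLastD (fs : List Int) (hs : List.Pairwise (· ≤ ·) fs) :
    ∀ y ∈ fs, y ≤ fs.getLastD 0 := by
  induction fs with
  | nil => simp
  | cons a t ih =>
    intro y hy
    rcases List.mem_cons.mp hy with rfl | hy'
    · cases t with
      | nil => simp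
      | cons b u =>
        have hab : y ≤ b := (List.pairwise_cons.mp hs).1 b (by simp)
        have := ih (List.pairwise_cons.mp hs).2 b (by simp)
        calc y ≤ b := hab
          _ ≤ (b :: u).getLastD 0 := this
          _ = (y :: b :: u).getLastD 0 := by simp
    · have := ih (List.pairwise_cons.mp hs).2 y hy'
      cases t with
      | nil => simp at hy'
      | cons b u => simpa using this

theorem pairwise_getD_mono (fs : List Int) (hs : List.Pairwise (· ≤ ·) fs) :
    ∀ i j : Nat, i ≤ j → j < fs.length → fs.getD i 0 ≤ fs.getD j 0 := by
  intro i j hij hj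
  rcases Nat.eq_or_lt_of_le hij with rfl | hlt
  · exact le_refl _
  · rw [List.getD_eq_getElem fs 0 (by omega), List.getD_eq_getElem fs 0 hj]
    exact List.pairwise_iff_getElem.mp hs i j (by omega) hj hlt

-- the simulation invariant: A's buffer is the unexpired suffix fs.drop h of the
-- sorted list of all accepted finish times
theorem loop_agree (bufsize : Int) :
    ∀ (packets : List (Int × Int)), (∀ p ∈ packets, 0 ≤ p.2) →
    ∀ (fs : List Int) (h : Nat), List.Pairwise (· ≤ ·) fs → h ≤ fs.length →
    (h = fs.length → fs = [] ∨ bufsize ≤ 0) →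
    pvALoop bufsize packets (fs.drop h) = pvBLoop bufsize packets fs h := by
  intro packets
  induction packets with
  | nil => intro _ fs h _ _ _; rfl
  | cons p rest ih =>
    intro hd fs h hs hle hinv
    obtain ⟨arrival, duration⟩ := p
    have hdur : (0:Int) ≤ duration := hd (arrival, duration) (by simp)
    have hdr : ∀ q ∈ rest, (0:Int) ≤ q.2 := fun q hq => hd q (by simp [hq])
    have hmono := pairwise_getD_mono fs hs
    obtain ⟨hb1, hb2, hb3, hb4⟩ :=
      pvBisect_spec fs arrival hmono h fs.length hle (le_refl _)
    set h' := pvBisect fs arrival h fs.length with hh'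
    have hdrop : pvDropExpired (fs.drop h) arrival = fs.drop h' :=
      dropExpired_eq fs arrival h h' hb1 hb2 hb3 (fun hr => hb4 h' (le_refl _) hr)
    rw [pvALoop, pvBLoop]
    simp only [hdrop, ← hh']
    have hlen : ((fs.drop h').length : Int) = (fs.length : Int) - (h' : Int) := by
      rw [List.length_drop]; omega
    by_cases hc : bufsize ≤ ((fs.drop h').length : Int)
    · rw [if_pos hc, if_pos (by omega : ((fs.length : Int) - (h' : Int)) ≥ bufsize)]
      rw [ih hdr fs h' hs hb2 (fun he => by
        rw [he] at hc
        simp at hc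
        exact Or.inr (by omega))]
    · rw [if_neg hc, if_neg (by omega : ¬ ((fs.length : Int) - (h' : Int)) ≥ bufsize)]
      have hlast : (fs.drop h').getLastD 0 = (if h' < fs.length then fs.getLastD 0 else 0) := by
        by_cases hl : h' < fs.length
        · rw [if_pos hl, getLastD_drop fs h' hl]
        · have : h' = fs.length := by omega
          rw [if_neg hl, this]; simp
      rw [hlast]
      set st := max arrival (if h' < fs.length then fs.getLastD 0 else 0) with hst
      have hsorted' : List.Pairwise (· ≤ ·) (fs ++ [st + duration]) := by
        rw [List.pairwise_append]
        refine ⟨hs, by simp, ?_⟩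
        intro y hy z hz
        simp at hz; subst hz
        by_cases hl : h' < fs.length
        · have h1 : y ≤ fs.getLastD 0 := mem_le_getLastD fs hs y hy
          have h2 : fs.getLastD 0 ≤ st := by rw [hst, if_pos hl]; exact le_max_right _ _
          omega
        · -- h' = fs.length: every element of fs is ≤ arrival ≤ st
          have hlen' : h' = fs.length := by omega
          by_cases hh : h = fs.length
          · rcases hinv hh with hfs | hbs
            · subst hfs; simp at hy
            · exfalso
              rw [hlen'] at hc
              simp at hc
              omega
          · obtain ⟨i, hi, rfl⟩ := List.mem_iff_getElem.mp hy
            have h1 : fs.getD i 0 ≤ fs.getD (fs.length - 1) 0 :=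
              hmono i (fs.length - 1) (by omega) (by omega)
            have h2 : fs.getD (fs.length - 1) 0 ≤ arrival :=
              hb3 (fs.length - 1) (by omega) (by omega)
            rw [List.getD_eq_getElem fs 0 hi] at h1
            have h3 : arrival ≤ st := by rw [hst]; exact le_max_left _ _
            omega
      have hrec : fs.drop h' ++ [st + duration] = (fs ++ [st + duration]).drop h' := by
        rw [List.drop_append_of_le_length hb2]
      rw [hrec, ih hdr (fs ++ [st + duration]) h' hsorted'
        (by simp; omega) (fun he => by simp at he; omega)]

-- ===== VERDICT (by name: the statement is the Claim_ definition above) =====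
theorem processPacket_spec : Claim_equal_processPacket := by
  intro packets bufsize _ hpre
  unfold Spec_processPacket processPacket processPacket_alt
  have := loop_agree bufsize packets hpre.2 [] 0 (by simp) (by simp) (by intro _; exact Or.inl rfl)
  simpa using this
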